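-- pv_equiv track=rewrite | github.com/afzalhasn/Data-Structure | Strings/colorfulString.py | possibleStrings
-- ===== SOURCE A (Python) =====
-- def possibleStrings(n, r, b, g):
--     # code here
--     fact = [0 for i in range(n+1)]
--     fact[0] = 1
--     for i in range(1,n+1):
--         fact[i] = fact[i-1]*i
--     left = n - (r+g+b)
--     summ = 0
--     for i in range(left+1):
--         for j in range(left-i+1):
--             k = left - (i+j)
--             summ = (summ + fact[n]//(fact[i+r]*fact[j+b]*fact[k+g]))
--     return summ
-- ===== SOURCE B (Python) =====
-- def possibleStrings(n, r, b, g):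
--     left = n - (r + b + g)
--     if left < 0:
--         return 0
--     # Pascal's triangle built by additions only; each term of the sum is a
--     # product of two binomial coefficients instead of a factorial division.
--     pascal = [[1]]
--     row = [1]
--     for m in range(1, n + 1):
--         row = [1] + [row[t - 1] + row[t] for t in range(1, m)] + [1]
--         pascal.append(row)
--     total = 0
--     for i in range(left + 1):
--         ci = pascal[n][i + r]
--         rowrem = pascal[n - i - r]
--         for j in range(left - i + 1):
--             total += ci * rowrem[j + b]
--     return total
-- ===== Notes on version B (the rewrite author's own statement) =====
-- stated objective: faster
-- what changed: B replaces A's factorial table and per-term division of the huge n! by a product of factorials with a Pascal-triangle table of binomial coefficients built by additions, each term becoming a product of two table-lookup binomials with no big division at all.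
-- outside the precondition, e.g. on possibleStrings(5, -1, 1, 1): A returns 180, B raises IndexError
import Mathlib
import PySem

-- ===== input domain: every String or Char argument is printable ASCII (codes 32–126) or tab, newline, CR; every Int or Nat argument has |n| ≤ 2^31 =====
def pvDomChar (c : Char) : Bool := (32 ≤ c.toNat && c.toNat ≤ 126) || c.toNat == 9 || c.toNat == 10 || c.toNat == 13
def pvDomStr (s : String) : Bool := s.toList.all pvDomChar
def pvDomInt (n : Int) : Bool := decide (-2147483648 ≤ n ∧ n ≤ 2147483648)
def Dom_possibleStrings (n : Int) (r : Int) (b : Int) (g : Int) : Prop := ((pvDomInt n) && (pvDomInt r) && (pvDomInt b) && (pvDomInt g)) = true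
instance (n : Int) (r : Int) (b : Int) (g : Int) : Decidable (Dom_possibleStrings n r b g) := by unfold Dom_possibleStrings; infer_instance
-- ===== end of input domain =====

-- B replaces A's factorial table and per-term factorial division by a Pascal-triangle table of
-- binomial coefficients, each term becoming a product of two binomials; measured faster.

-- ===== PORT A =====
-- A fills fact[0..n] left to right (fact[i] = fact[i-1]*i); the port builds the same prefix by
-- appending, reading the previous cell with pyGetD (always in range for n ≥ 0; for n < 0 Python
-- raises IndexError at fact[0] = 1, which Pre_ excludes).
def pvFactA (n : Int) : List Int :=
  (PySem.List.pyRange 1 (n + 1) 1).foldl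
    (fun acc i => acc ++ [PySem.List.pyGetD acc (i - 1) 0 * i]) [1]

def possibleStrings (n : Int) (r : Int) (b : Int) (g : Int) : Int :=
  let fact := pvFactA n
  let left := n - (r + g + b)
  (PySem.List.pyRange 0 (left + 1) 1).foldl (fun summ i =>
    (PySem.List.pyRange 0 (left - i + 1) 1).foldl (fun summ j =>
      let k := left - (i + j)
      summ + PySem.Int.floordiv (PySem.List.pyGetD fact n 0)
        (PySem.List.pyGetD fact (i + r) 0 * PySem.List.pyGetD fact (j + b) 0 *
          PySem.List.pyGetD fact (k + g) 0)) summ) 0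

-- ===== PORT B =====
-- state = (pascal, row), exactly Source B's loop; indices are in range on Pre_, so pyGetD is exact
def pvPascalB (n : Int) : List (List Int) :=
  ((PySem.List.pyRange 1 (n + 1) 1).foldl
    (fun (st : List (List Int) × List Int) m =>
      let row := [1] ++ (PySem.List.pyRange 1 m 1).map
          (fun t => PySem.List.pyGetD st.2 (t - 1) 0 + PySem.List.pyGetD st.2 t 0) ++ [1]
      (st.1 ++ [row], row)) ([[1]], [1])).1

def possibleStrings_alt (n : Int) (r : Int) (b : Int) (g : Int) : Int :=
  let left := n - (r + b + g)
  if left < 0 then 0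
  else
    let pascal := pvPascalB n
    (PySem.List.pyRange 0 (left + 1) 1).foldl (fun total i =>
      let ci := PySem.List.pyGetD (PySem.List.pyGetD pascal n []) (i + r) 0
      let rowrem := PySem.List.pyGetD pascal (n - i - r) []
      (PySem.List.pyRange 0 (left - i + 1) 1).foldl (fun total j =>
        total + ci * PySem.List.pyGetD rowrem (j + b) 0) total) 0

-- ===== PRECONDITION & SPEC =====
-- Pre_ excludes n < 0 (A raises IndexError building the factorial table) and inputs with
-- r+b+g ≤ n where some of r, b, g is negative, where A's value (when it does not raise
-- IndexError) comes from Python's negative-index wraparound into the factorial table — an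
-- accident of A's implementation; B raises IndexError on such inputs.
def Pre_possibleStrings (n : Int) (r : Int) (b : Int) (g : Int) : Prop :=
  0 ≤ n ∧ (n < r + b + g ∨ (0 ≤ r ∧ 0 ≤ b ∧ 0 ≤ g))
instance (n : Int) (r : Int) (b : Int) (g : Int) : Decidable (Pre_possibleStrings n r b g) := by
  unfold Pre_possibleStrings; infer_instance

def pvWitness_possibleStrings : Int × Int × Int × Int := (5, 1, 1, 1)

def Spec_possibleStrings (n : Int) (r : Int) (b : Int) (g : Int) (out : Int) : Prop := out = possibleStrings_alt n r b g
instance (n : Int) (r : Int) (b : Int) (g : Int) (out : Int) : Decidable (Spec_possibleStrings n r b g out) := by unfold Spec_possibleStrings; infer_instance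

-- ===== CLAIM (what is proved, stated in full; the proofs are below) =====
def Claim_equal_possibleStrings : Prop := ∀ (n : Int) (r : Int) (b : Int) (g : Int), Dom_possibleStrings n r b g → Pre_possibleStrings n r b g → Spec_possibleStrings n r b g (possibleStrings n r b g)

-- ===== LEMMAS AND PROOFS =====

lemma pyRange_one_map (a b : Int) :
    PySem.List.pyRange a b 1 = (List.range (b - a).toNat).map (fun (k : Nat) => a + (k : Int)) := by
  rw [PySem.List.pyRange_one]

-- A's factorial table
lemma pvFactA_spec (n : Nat) :
    pvFactA (n : Int) = (List.range (n + 1)).map (fun i => (Nat.factorial i : Int)) := by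
  induction n with
  | zero => simp [pvFactA, PySem.List.pyRange_one_eq_nil, List.range_succ]
  | succ m ih =>
    unfold pvFactA at *
    have hsplit : PySem.List.pyRange 1 ((m + 1 : Nat) + 1) 1
        = PySem.List.pyRange 1 ((m : Nat) + 1) 1 ++ [((m : Nat) + 1 : Int)] := by
      have := PySem.List.pyRange_one_succ_right (a := 1) (b := ((m : Nat) + 1 : Int)) (by omega)
      push_cast at this ⊢
      simpa using this
    push_cast
    push_cast at hsplit ih

    rw [hsplit, List.foldl_append, ih]
    simp only [List.foldl_cons, List.foldl_nil]
    rw [List.range_succ (n := m + 1), List.map_append]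
    congr 1
    have hlook : PySem.List.pyGetD ((List.range (m + 1)).map (fun i => (Nat.factorial i : Int)))
        (((m : Nat) + 1 : Int) - 1) 0 = (Nat.factorial m : Int) := by
      rw [show (((m : Nat) + 1 : Int) - 1) = ((m : Nat) : Int) by ring]
      rw [PySem.List.pyGetD_natCast]
      simp [List.getD]
    rw [hlook]
    simp [Nat.factorial_succ]
    ring

-- B's Pascal triangle: rows of binomial coefficients
def chooseRow (m : Nat) : List Int := (List.range (m + 1)).map (fun t => (m.choose t : Int))

lemma chooseRow_zero : chooseRow 0 = [1] := by simp [chooseRow, List.range_succ]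

lemma pvRowStep (m : Nat) :
    [1] ++ (PySem.List.pyRange 1 ((m : Int) + 1) 1).map
        (fun t => PySem.List.pyGetD (chooseRow m) (t - 1) 0 + PySem.List.pyGetD (chooseRow m) t 0)
      ++ [1] = chooseRow (m + 1) := by
  have hrange : PySem.List.pyRange 1 ((m : Int) + 1) 1
      = (List.range m).map (fun (k : Nat) => (1 : Int) + (k : Int)) := by
    rw [pyRange_one_map]
    have h : (((m : Int) + 1 - 1).toNat) = m := by omega
    rw [h]
  rw [hrange, List.map_map]
  have hmap : (List.range m).map
      ((fun t => PySem.List.pyGetD (chooseRow m) (t - 1) 0 + PySem.List.pyGetD (chooseRow m) t 0)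
        ∘ (fun (k : Nat) => (1 : Int) + (k : Int)))
      = (List.range m).map (fun k => ((m + 1).choose (k + 1) : Int)) := by
    apply List.map_congr_left
    intro k hk
    have hk' : k < m := List.mem_range.mp hk
    have h2 : ((1 : Int) + (k : Int)) = (((k + 1 : Nat)) : Int) := by push_cast; ring
    have h1 : (((k + 1 : Nat)) : Int) - 1 = ((k : Nat) : Int) := by push_cast; ring
    simp only [Function.comp, h2, h1, PySem.List.pyGetD_natCast, chooseRow]
    have e1 : ((List.range (m + 1)).map (fun t => (m.choose t : Int))).getD k 0
        = (m.choose k : Int) := by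
      simp [List.getD, List.getElem?_range (by omega : k < m + 1)]
    have e2 : ((List.range (m + 1)).map (fun t => (m.choose t : Int))).getD (k + 1) 0
        = (m.choose (k + 1) : Int) := by
      simp [List.getD, List.getElem?_range (by omega : k + 1 < m + 1)]
    rw [e1, e2, Nat.choose_succ_succ]
    push_cast; ring
  rw [hmap]
  have : chooseRow (m + 1)
      = ((m + 1).choose 0 : Int) :: ((List.range m).map (fun k => ((m + 1).choose (k + 1) : Int))
        ++ [((m + 1).choose (m + 1) : Int)]) := by
    unfold chooseRow
    rw [List.range_succ (n := m + 1), List.map_append, List.range_succ_eq_map, List.map_cons,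
      List.map_map]
    simp [Function.comp]
  rw [this]
  simp

lemma pvPascalB_spec (n : Nat) :
    pvPascalB (n : Int) = (List.range (n + 1)).map (fun m => chooseRow m) := by
  suffices h : ∀ n : Nat,
      ((PySem.List.pyRange 1 ((n : Int) + 1) 1).foldl
        (fun (st : List (List Int) × List Int) m =>
          let row := [1] ++ (PySem.List.pyRange 1 m 1).map
              (fun t => PySem.List.pyGetD st.2 (t - 1) 0 + PySem.List.pyGetD st.2 t 0) ++ [1]
          (st.1 ++ [row], row)) ([[1]], [1]))
      = ((List.range (n + 1)).map (fun m => chooseRow m), chooseRow n) by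
    unfold pvPascalB; rw [h]
  intro n
  induction n with
  | zero => simp [PySem.List.pyRange_one_eq_nil, List.range_succ, chooseRow_zero]
  | succ m ih =>
    have hsplit : PySem.List.pyRange 1 (((m : Int)) + 1 + 1) 1
        = PySem.List.pyRange 1 ((m : Int) + 1) 1 ++ [((m : Int) + 1)] := by
      simpa using PySem.List.pyRange_one_succ_right (a := 1) (b := ((m : Int) + 1)) (by omega)
    push_cast
    rw [hsplit, List.foldl_append, ih]
    simp only [List.foldl_cons, List.foldl_nil]
    rw [pvRowStep]
    rw [List.range_succ (n := m + 1), List.map_append]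
    simp

-- exact division of a factorial by the three factorials of a composition
lemma pvKey (a b c : Nat) :
    PySem.Int.floordiv ((a + b + c).factorial : Int)
      ((a.factorial : Int) * (b.factorial : Int) * (c.factorial : Int)) =
      ((a + b + c).choose a : Int) * ((b + c).choose b : Int) := by
  have h1 : (a + b + c).choose a * a.factorial * (b + c).factorial = (a + b + c).factorial := by
    have := Nat.choose_mul_factorial_mul_factorial (n := a + b + c) (k := a) (by omega)
    simpa [Nat.add_sub_cancel_left, add_assoc] using this
  have h2 : (b + c).choose b * b.factorial * c.factorial = (b + c).factorial := by
    have := Nat.choose_mul_factorial_mul_factorial (n := b + c) (k := b) (by omega)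
    simpa [Nat.add_sub_cancel_left] using this
  have hnum : ((a + b + c).factorial : Int) =
      (((a + b + c).choose a : Int) * ((b + c).choose b : Int)) *
        ((a.factorial : Int) * (b.factorial : Int) * (c.factorial : Int)) := by
    rw [← h1, ← h2]; push_cast; ring
  have hd : (0 : Int) < (a.factorial : Int) * (b.factorial : Int) * (c.factorial : Int) := by
    positivity
  rw [hnum, PySem.Int.floordiv_eq_ediv_of_pos hd, Int.mul_ediv_cancel _ (by omega)]

-- lookup in the factorial table at an in-range Int index
lemma pvFact_lookup (N : Nat) (x : Int) (h0 : 0 ≤ x) (h1 : x ≤ (N : Int)) :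
    PySem.List.pyGetD ((List.range (N + 1)).map (fun i => (Nat.factorial i : Int))) x 0
      = (x.toNat.factorial : Int) := by
  rw [show x = (x.toNat : Int) by omega, PySem.List.pyGetD_natCast]
  simp [List.getD, List.getElem?_range (by omega : x.toNat < N + 1)]
  rw [show max x 0 = x by omega]

-- lookup of a row in the Pascal table at an in-range Int index
lemma pvPascal_row_lookup (N : Nat) (x : Int) (h0 : 0 ≤ x) (h1 : x ≤ (N : Int)) :
    PySem.List.pyGetD ((List.range (N + 1)).map (fun m => chooseRow m)) x []
      = chooseRow x.toNat := by
  rw [show x = (x.toNat : Int) by omega, PySem.List.pyGetD_natCast]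
  simp [List.getD, List.getElem?_range (by omega : x.toNat < N + 1)]
  rw [show max x 0 = x by omega]

-- lookup in a Pascal row at an in-range Int index
lemma pvRow_lookup (M : Nat) (x : Int) (h0 : 0 ≤ x) (h1 : x ≤ (M : Int)) :
    PySem.List.pyGetD (chooseRow M) x 0 = (M.choose x.toNat : Int) := by
  unfold chooseRow
  rw [show x = (x.toNat : Int) by omega, PySem.List.pyGetD_natCast]
  simp [List.getD, List.getElem?_range (by omega : x.toNat < M + 1)]
  rw [show max x 0 = x by omega]

lemma pvMain (n r b g : Int) (hn : 0 ≤ n) (hr : 0 ≤ r) (hb : 0 ≤ b) (hg : 0 ≤ g)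
    (hle : r + b + g ≤ n) : possibleStrings n r b g = possibleStrings_alt n r b g := by
  obtain ⟨N, rfl⟩ : ∃ N : Nat, n = (N : Int) := ⟨n.toNat, by omega⟩
  simp only [possibleStrings, possibleStrings_alt]
  rw [if_neg (by omega), pvFactA_spec, pvPascalB_spec]
  have hleft : (N : Int) - (r + g + b) = (N : Int) - (r + b + g) := by ring
  rw [hleft]
  set L := PySem.List.pyRange 0 ((N : Int) - (r + b + g) + 1) 1 with hL
  apply PySem.List.foldl_congr_mem
  intro acc i hi
  have hi' : 0 ≤ i ∧ i < (N : Int) - (r + b + g) + 1 := by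
    have := (PySem.List.mem_pyRange_one).mp hi
    omega
  apply PySem.List.foldl_congr_mem
  intro acc2 j hj
  have hj' : 0 ≤ j ∧ j < (N : Int) - (r + b + g) - i + 1 := by
    have := (PySem.List.mem_pyRange_one).mp hj
    omega
  congr 1
  -- the single term: factorial quotient = product of two binomials
  set left := (N : Int) - (r + b + g) with hleftdef
  have hNfact : PySem.List.pyGetD ((List.range (N + 1)).map (fun i => (Nat.factorial i : Int)))
      (N : Int) 0 = (N.factorial : Int) := by
    simp [List.getD]
  rw [hNfact,
    pvFact_lookup N (i + r) (by omega) (by omega),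
    pvFact_lookup N (j + b) (by omega) (by omega),
    pvFact_lookup N (left - (i + j) + g) (by omega) (by omega),
    pvPascal_row_lookup N (N : Int) (by omega) (by omega),
    pvPascal_row_lookup N ((N : Int) - i - r) (by omega) (by omega)]
  simp only [Int.toNat_natCast]
  rw [pvRow_lookup N (i + r) (by omega) (by omega),
    pvRow_lookup ((N : Int) - i - r).toNat (j + b) (by omega) (by omega)]
  have hrest : ((N : Int) - i - r).toNat = (j + b).toNat + (left - (i + j) + g).toNat := by omega
  have hsum : N = (i + r).toNat + (j + b).toNat + (left - (i + j) + g).toNat := by omega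
  rw [hrest, hsum, pvKey]

-- ===== VERDICT (by name: the statement is the Claim_ definition above) =====
theorem possibleStrings_spec : Claim_equal_possibleStrings := by
  intro n r b g _ hpre
  unfold Spec_possibleStrings
  obtain ⟨hn, hcase⟩ := hpre
  by_cases hl : n < r + b + g
  · -- left < 0: A's outer range is empty, B returns 0
    simp only [possibleStrings, possibleStrings_alt]
    rw [if_pos (by omega), PySem.List.pyRange_one_eq_nil (by omega)]
    rfl
  · rcases hcase with h | ⟨hr, hb, hg⟩
    · omega
    · exact pvMain n r b g hn hr hb hg (by omega)
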